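-- pv_equiv track=rewrite | github.com/burning-calamity/extirpation | src/extirpation/bundled_online/fractionated_morse.py | _keyed_alphabet
-- ===== SOURCE A (Python) =====
-- def _keyed_alphabet(key: str = '') -> str:
--     base = 'ABCDEFGHIJKLMNOPQRSTUVWXYZ?'
--     seen: set[str] = set()
--     out: list[str] = []
--     for ch in (key.upper() + base):
--         if ch in base and ch not in seen:
--             seen.add(ch)
--             out.append(ch)
--     return ''.join(out)
-- ===== SOURCE B (Python) =====
-- def _keyed_alphabet(key: str = '') -> str:
--     base = 'ABCDEFGHIJKLMNOPQRSTUVWXYZ?'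
--     k = key.upper()
--
--     def rank(c: str) -> int:
--         i = k.find(c)
--         return i if i >= 0 else len(k) + base.find(c)
--
--     return ''.join(sorted(base, key=rank))
-- ===== Notes on version B (the rewrite author's own statement) =====
-- stated objective: alternative
-- what changed: Instead of scanning key+base with a seen-set and appending unseen base characters, B sorts the fixed 27-character base by a rank function (first-occurrence index in the uppercased key, else len(key)+position in base); there is no dedup loop and no seen set at all.
import Mathlib
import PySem

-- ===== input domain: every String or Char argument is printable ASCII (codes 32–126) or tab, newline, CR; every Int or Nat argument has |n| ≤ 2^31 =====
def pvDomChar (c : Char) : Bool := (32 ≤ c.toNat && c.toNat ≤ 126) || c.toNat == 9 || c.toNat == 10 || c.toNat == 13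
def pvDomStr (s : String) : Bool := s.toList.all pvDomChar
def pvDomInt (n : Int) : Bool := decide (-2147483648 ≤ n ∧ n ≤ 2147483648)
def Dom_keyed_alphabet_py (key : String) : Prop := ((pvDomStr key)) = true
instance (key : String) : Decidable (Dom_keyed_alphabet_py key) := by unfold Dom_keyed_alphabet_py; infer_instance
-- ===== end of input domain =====

-- B replaces A's seen-set dedup scan of key+base by sorting the fixed 27-char base
-- by a first-occurrence rank function (alternative algorithm: no seen set, no dedup loop).

-- ===== PORT A =====
-- one step of A's loop: keep ch if it is a base char not seen yet
def kaStep (st : PySem.Set Char × List Char) (ch : Char) : PySem.Set Char × List Char :=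
  if "ABCDEFGHIJKLMNOPQRSTUVWXYZ?".toList.contains ch && !(PySem.Set.contains st.1 ch)
  then (PySem.Set.add st.1 ch, st.2 ++ [ch]) else st

def keyed_alphabet_py (key : String) : String :=
  let res := ((PySem.Str.upper key) ++ "ABCDEFGHIJKLMNOPQRSTUVWXYZ?").toList.foldl kaStep ([], [])
  String.ofList res.2

-- ===== PORT B =====
-- single-character str.find: first index of c, or -1 (exact for a 1-char needle)
def kaFind1 (l : List Char) (c : Char) : Int :=
  match l.idxOf? c with
  | some i => (i : Int)
  | none => -1

-- Source B's rank: first-occurrence index in the uppercased key, else len(key)+position in base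
def kaRank (k : List Char) (c : Char) : Int :=
  let i := kaFind1 k c
  if 0 ≤ i then i else (k.length : Int) + kaFind1 "ABCDEFGHIJKLMNOPQRSTUVWXYZ?".toList c

def keyed_alphabet_py_alt (key : String) : String :=
  let k := (PySem.Str.upper key).toList
  String.ofList (PySem.List.sorted "ABCDEFGHIJKLMNOPQRSTUVWXYZ?".toList (kaRank k) false)

-- ===== PRECONDITION & SPEC =====
def Spec_keyed_alphabet_py (key : String) (out : String) : Prop := out = keyed_alphabet_py_alt key
instance (key : String) (out : String) : Decidable (Spec_keyed_alphabet_py key out) := by unfold Spec_keyed_alphabet_py; infer_instance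

-- ===== CLAIM (what is proved, stated in full; the proofs are below) =====
def Claim_equal_keyed_alphabet_py : Prop := ∀ (key : String), Dom_keyed_alphabet_py key → Spec_keyed_alphabet_py key (keyed_alphabet_py key)

-- ===== LEMMAS AND PROOFS =====

-- the base alphabet, as a list
def kaB : List Char := "ABCDEFGHIJKLMNOPQRSTUVWXYZ?".toList

set_option maxRecDepth 4096 in
theorem kaB_nodup : kaB.Nodup := by decide

theorem idxOf?_eq_some_idxOf (l : List Char) (a : Char) (h : a ∈ l) :
    l.idxOf? a = some (l.idxOf a) := by
  induction l with
  | nil => simp at h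
  | cons x t ih =>
    by_cases hax : x = a
    · subst hax; simp [List.idxOf?_cons]
    · have ht : a ∈ t := by
        rcases List.mem_cons.mp h with h1 | h1
        · exact absurd h1.symm hax
        · exact h1
      simp [List.idxOf?_cons, hax, ih ht, beq_iff_eq]

-- invariant of A's fold over a processed prefix l: seen = out (as lists), out holds
-- exactly the base characters of l, and out is ordered by first occurrence in l
theorem kaFold_inv (l : List Char) :
    (l.foldl kaStep ([], [])).1 = (l.foldl kaStep ([], [])).2 ∧
    (∀ c, c ∈ (l.foldl kaStep ([], [])).2 ↔ c ∈ l ∧ c ∈ kaB) ∧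
    (l.foldl kaStep ([], [])).2.Pairwise (fun a b => l.idxOf a < l.idxOf b) := by
  induction l using List.reverseRecOn with
  | nil => exact ⟨rfl, by simp, by simp⟩
  | append_singleton l x ih =>
    rcases hst : l.foldl kaStep (([] : PySem.Set Char), ([] : List Char)) with ⟨s, o⟩
    rw [hst] at ih
    obtain ⟨hse, hmem, hpw⟩ := ih
    simp only at hse hmem hpw
    subst hse
    rw [List.foldl_append, hst]
    have hxB' : x ∈ kaB ↔ x ∈ "ABCDEFGHIJKLMNOPQRSTUVWXYZ?".toList := Iff.rfl
    simp only [List.foldl_cons, List.foldl_nil]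
    by_cases hxB : x ∈ kaB
    · by_cases hxo : x ∈ s
      · -- already seen: state unchanged
        have hstep : kaStep (s, s) x = (s, s) := by
          simp [kaStep, PySem.Set.contains, List.contains_eq_mem, hxo]
        rw [hstep]
        have hsub : ∀ a ∈ s, a ∈ l := fun a ha => ((hmem a).mp ha).1
        refine ⟨rfl, ?_, ?_⟩
        · intro c
          rcases hmem c with ⟨h1, h2⟩
          constructor
          · intro hc
            rcases h1 hc with ⟨hcl, hcB⟩
            exact ⟨List.mem_append_left _ hcl, hcB⟩
          · rintro ⟨hcl, hcB⟩
            rcases List.mem_append.mp hcl with hcl | hcl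
            · exact h2 ⟨hcl, hcB⟩
            · have : c = x := by simpa using hcl
              subst this; exact hxo
        · refine hpw.imp_of_mem ?_
          intro a b ha hb hab
          rw [List.idxOf_append_of_mem (hsub a ha), List.idxOf_append_of_mem (hsub b hb)]
          exact hab
      · -- new base char: appended
        have hc1 : "ABCDEFGHIJKLMNOPQRSTUVWXYZ?".toList.contains x = true := by
          rw [List.contains_eq_mem]; exact decide_eq_true (hxB'.mp hxB)
        have hc2 : PySem.Set.contains s x = false := by
          simp [PySem.Set.contains, List.contains_eq_mem, hxo]
        have hstep : kaStep (s, s) x = (s ++ [x], s ++ [x]) := by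
          unfold kaStep
          rw [hc1]
          simp [PySem.Set.add, hxo, PySem.Set.contains, List.contains_eq_mem]
        rw [hstep]
        have hxl : x ∉ l := fun hxl => hxo ((hmem x).mpr ⟨hxl, hxB⟩)
        have hsub : ∀ a ∈ s, a ∈ l := fun a ha => ((hmem a).mp ha).1
        have hidx : (l ++ [x]).idxOf x = l.length := by
          rw [List.idxOf_append]; simp [hxl]
        refine ⟨rfl, ?_, ?_⟩
        · intro c
          simp only [List.mem_append, List.mem_singleton]
          constructor
          · rintro (hc | rfl)
            · rcases (hmem c).mp hc with ⟨hcl, hcB⟩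
              exact ⟨Or.inl hcl, hcB⟩
            · exact ⟨Or.inr rfl, hxB⟩
          · rintro ⟨hcl | rfl, hcB⟩
            · exact Or.inl ((hmem c).mpr ⟨hcl, hcB⟩)
            · exact Or.inr rfl
        · rw [List.pairwise_append]
          refine ⟨?_, List.pairwise_singleton _ _, ?_⟩
          · refine hpw.imp_of_mem ?_
            intro a b ha hb hab
            rw [List.idxOf_append_of_mem (hsub a ha), List.idxOf_append_of_mem (hsub b hb)]
            exact hab
          · intro a ha b hb
            have hb' : b = x := by simpa using hb
            subst hb'
            rw [hidx, List.idxOf_append_of_mem (hsub a ha)]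
            exact List.idxOf_lt_length_of_mem (hsub a ha)
    · -- not a base char: state unchanged
      have hc1 : "ABCDEFGHIJKLMNOPQRSTUVWXYZ?".toList.contains x = false := by
        rw [List.contains_eq_mem]; exact decide_eq_false (fun h => hxB (hxB'.mpr h))
      have hstep : kaStep (s, s) x = (s, s) := by
        unfold kaStep; rw [hc1]; simp
      rw [hstep]
      have hsub : ∀ a ∈ s, a ∈ l := fun a ha => ((hmem a).mp ha).1
      refine ⟨rfl, ?_, ?_⟩
      · intro c
        rcases hmem c with ⟨h1, h2⟩
        constructor
        · intro hc
          rcases h1 hc with ⟨hcl, hcB⟩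
          exact ⟨List.mem_append_left _ hcl, hcB⟩
        · rintro ⟨hcl, hcB⟩
          rcases List.mem_append.mp hcl with hcl | hcl
          · exact h2 ⟨hcl, hcB⟩
          · have : c = x := by simpa using hcl
            subst this; exact absurd hcB hxB
      · refine hpw.imp_of_mem ?_
        intro a b ha hb hab
        rw [List.idxOf_append_of_mem (hsub a ha), List.idxOf_append_of_mem (hsub b hb)]
        exact hab

-- for a base character, Source B's rank is exactly its first-occurrence index in key+base
theorem kaRank_eq (k : List Char) (c : Char) (hc : c ∈ kaB) :
    kaRank k c = (((k ++ kaB).idxOf c : Nat) : Int) := by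
  unfold kaRank kaFind1
  by_cases hk : c ∈ k
  · rw [idxOf?_eq_some_idxOf k c hk]
    simp [List.idxOf_append_of_mem hk]
  · rw [List.idxOf?_eq_none_iff.mpr hk,
        idxOf?_eq_some_idxOf "ABCDEFGHIJKLMNOPQRSTUVWXYZ?".toList c hc]
    rw [List.idxOf_append]
    simp only [hk, if_false]
    rw [show kaB = "ABCDEFGHIJKLMNOPQRSTUVWXYZ?".toList from rfl]
    push_cast
    ring

-- ===== VERDICT (by name: the statement is the Claim_ definition above) =====
theorem keyed_alphabet_py_spec : Claim_equal_keyed_alphabet_py := by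
  intro key _
  unfold Spec_keyed_alphabet_py keyed_alphabet_py keyed_alphabet_py_alt
  simp only []
  set k := (PySem.Str.upper key).toList with hk
  have htl : ((PySem.Str.upper key) ++ "ABCDEFGHIJKLMNOPQRSTUVWXYZ?").toList = k ++ kaB := by
    simp [kaB, hk]
  rw [htl]
  rcases hst : (k ++ kaB).foldl kaStep (([] : PySem.Set Char), ([] : List Char)) with ⟨s, o⟩
  have hinv := kaFold_inv (k ++ kaB)
  rw [hst] at hinv
  obtain ⟨hse, hmem, hpw⟩ := hinv
  simp only at hse hmem hpw
  -- o is a permutation of base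
  have honodup : o.Nodup := by
    refine hpw.imp ?_
    intro a b hab heq
    subst heq; exact lt_irrefl _ hab
  have homem : ∀ c, c ∈ o ↔ c ∈ kaB := by
    intro c
    rw [hmem c]
    constructor
    · exact fun h => h.2
    · exact fun h => ⟨List.mem_append_right _ h, h⟩
  have hperm : o.Perm kaB :=
    (List.perm_ext_iff_of_nodup honodup kaB_nodup).mpr homem
  -- o is strictly increasing under the rank key
  have hpwr : o.Pairwise (fun a b => kaRank k a < kaRank k b) := by
    refine hpw.imp_of_mem ?_
    intro a b ha hb hab
    rw [kaRank_eq k a ((homem a).mp ha), kaRank_eq k b ((homem b).mp hb)]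
    exact_mod_cast hab
  have hsorted := PySem.List.sorted_eq_of_perm_of_pairwise_lt kaB o (kaRank k) hperm hpwr
  show String.ofList o = String.ofList (PySem.List.sorted "ABCDEFGHIJKLMNOPQRSTUVWXYZ?".toList (kaRank k) false)
  rw [show "ABCDEFGHIJKLMNOPQRSTUVWXYZ?".toList = kaB from rfl, hsorted]
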